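-- pv_equiv track=rewrite | github.com/andythewhale/AI_Isolation | game_agent.py | ko_match
-- ===== SOURCE A (Python) =====
-- def ko_match(my_moves, enemy_moves):
--     check = False
--     spot = enemy_moves
--     for move in my_moves:
--         if move == spot:
--             check = True
--         else:
--             check = False
--     return check
-- ===== SOURCE B (Python) =====
-- def ko_match(my_moves, enemy_moves):
--     # Only the last iteration's comparison survives in A; compute it directly.
--     return bool(my_moves) and my_moves[-1] == enemy_moves
-- ===== Notes on version B (the rewrite author's own statement) =====
-- stated objective: simpler
-- what changed: Replaces the whole loop (whose flag is overwritten each iteration, so only the final comparison matters) with a direct comparison of the last element against enemy_moves.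
import Mathlib
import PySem

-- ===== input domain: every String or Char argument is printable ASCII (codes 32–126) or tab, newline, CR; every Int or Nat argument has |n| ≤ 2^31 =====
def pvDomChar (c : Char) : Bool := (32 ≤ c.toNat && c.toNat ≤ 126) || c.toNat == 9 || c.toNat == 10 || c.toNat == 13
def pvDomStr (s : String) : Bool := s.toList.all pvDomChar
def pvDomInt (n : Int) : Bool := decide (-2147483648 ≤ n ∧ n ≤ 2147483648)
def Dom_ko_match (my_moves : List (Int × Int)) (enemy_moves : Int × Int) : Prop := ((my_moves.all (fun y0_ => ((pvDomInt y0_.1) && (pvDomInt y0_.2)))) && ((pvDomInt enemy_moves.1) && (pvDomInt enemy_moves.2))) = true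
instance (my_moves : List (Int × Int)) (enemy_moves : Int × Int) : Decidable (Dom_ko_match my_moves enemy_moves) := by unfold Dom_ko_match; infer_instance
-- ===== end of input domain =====

-- ===== PORT A =====
-- B replaces A's loop by a direct comparison of the last element (simpler; only the final iteration's flag survives in A).
def ko_match (my_moves : List (Int × Int)) (enemy_moves : Int × Int) : Bool :=
  let spot := enemy_moves
  my_moves.foldl (fun _check move => if move == spot then true else false) false

-- ===== PORT B =====
def ko_match_alt (my_moves : List (Int × Int)) (enemy_moves : Int × Int) : Bool :=
  match my_moves.getLast? with
  | none => false
  | some m => m == enemy_moves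

-- ===== PRECONDITION & SPEC =====
def Spec_ko_match (my_moves : List (Int × Int)) (enemy_moves : Int × Int) (out : Bool) : Prop := out = ko_match_alt my_moves enemy_moves
instance (my_moves : List (Int × Int)) (enemy_moves : Int × Int) (out : Bool) : Decidable (Spec_ko_match my_moves enemy_moves out) := by unfold Spec_ko_match; infer_instance

-- ===== CLAIM (what is proved, stated in full; the proofs are below) =====
def Claim_equal_ko_match : Prop := ∀ (my_moves : List (Int × Int)) (enemy_moves : Int × Int), Dom_ko_match my_moves enemy_moves → Spec_ko_match my_moves enemy_moves (ko_match my_moves enemy_moves)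

-- ===== LEMMAS AND PROOFS =====

-- ===== VERDICT (by name: the statement is the Claim_ definition above) =====
theorem foldl_last {e : Int × Int} : ∀ (l : List (Int × Int)) (b : Bool),
    l.foldl (fun _check move => if move == e then true else false) b =
      (match l.getLast? with | none => b | some m => m == e)
  | [], b => rfl
  | x :: xs, b => by
    rw [List.foldl_cons, foldl_last xs]
    cases xs with
    | nil =>
      show (if (x == e) = true then true else false) = (x == e)
      split <;> simp_all
    | cons y ys =>
      have hs : (y :: ys).getLast?.isSome := by simp
      obtain ⟨m, hm⟩ := Option.isSome_iff_exists.mp hs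
      rw [List.getLast?_cons_cons, hm]

theorem ko_match_spec : Claim_equal_ko_match := by
  intro l e _
  unfold Spec_ko_match ko_match ko_match_alt
  rw [foldl_last]
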